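-- pv_equiv track=rewrite | github.com/unoplat/unoplat-code-confluence | unoplat-code-confluence-ingestion/code-confluence-flow-bridge/src/code_confluence_flow_bridge/engine/programming_language/python/python_tree_sitter_framework_detector.py | _matches_superclass
-- ===== SOURCE A (Python) =====
-- from typing import Dict, List, Literal, Optional
--
-- def _matches_superclass(
--     superclass_text: str, absolute_paths: List[str], import_aliases: Dict[str, str]
-- ) -> bool:
--     """Check whether a superclass text resolves to an imported symbol.
--
--     Args:
--         superclass_text: The raw text of the superclass node from the AST.
--         absolute_paths: Candidate fully-qualified dotted paths for the feature.
--         import_aliases: Mapping of dotted import path → local alias in the file.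
--
--     Returns:
--         True if the superclass text matches a directly imported symbol or a
--         module-qualified attribute access for any of the *absolute_paths*.
--     """
--     for abs_path in absolute_paths:
--         path_parts = abs_path.split(".")
--         short_name = path_parts[-1]
--         module_path = ".".join(path_parts[:-1])
--
--         # Direct import match (e.g. `from django.db.models import Model`)
--         if abs_path in import_aliases and superclass_text == import_aliases[abs_path]:
--             return True
--
--         # Module-qualified match (e.g. `import django.db.models` → `models.Model`)
--         if module_path and module_path in import_aliases:
--             module_alias = import_aliases[module_path]
--             if superclass_text == f"{module_alias}.{short_name}":
--                 return True
--
--     return False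
-- ===== SOURCE B (Python) =====
-- def _matches_superclass(superclass_text, absolute_paths, import_aliases):
--     """Iterate over the imports instead of the paths: for each imported
--     (dotted path, alias) pair, either the alias itself names the superclass and
--     the dotted path is a candidate, or the superclass text is written as
--     'alias.Short' and re-joining dotted path + '.Short' yields a candidate."""
--     paths = set(absolute_paths)
--     for dotted, alias in import_aliases.items():
--         # direct import: the superclass is written exactly as the alias
--         if superclass_text == alias and dotted in paths:
--             return True
--         # module-qualified: superclass written as "<alias>.<Short>" where
--         # <Short> is a single (dot-free) attribute of the imported module
--         if dotted and superclass_text.startswith(alias + "."):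
--             short = superclass_text[len(alias) + 1:]
--             if "." not in short and dotted + "." + short in paths:
--                 return True
--     return False
-- ===== Notes on version B (the rewrite author's own statement) =====
-- stated objective: alternative
-- what changed: B inverts the iteration: instead of looping over absolute_paths and splitting each path into module/short name, it loops over the import_aliases items, matches the superclass text against the alias (or strips an 'alias.' prefix off it) and re-joins the dotted path with the remaining dot-free attribute, testing membership in a precomputed set of the paths.
import Mathlib
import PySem

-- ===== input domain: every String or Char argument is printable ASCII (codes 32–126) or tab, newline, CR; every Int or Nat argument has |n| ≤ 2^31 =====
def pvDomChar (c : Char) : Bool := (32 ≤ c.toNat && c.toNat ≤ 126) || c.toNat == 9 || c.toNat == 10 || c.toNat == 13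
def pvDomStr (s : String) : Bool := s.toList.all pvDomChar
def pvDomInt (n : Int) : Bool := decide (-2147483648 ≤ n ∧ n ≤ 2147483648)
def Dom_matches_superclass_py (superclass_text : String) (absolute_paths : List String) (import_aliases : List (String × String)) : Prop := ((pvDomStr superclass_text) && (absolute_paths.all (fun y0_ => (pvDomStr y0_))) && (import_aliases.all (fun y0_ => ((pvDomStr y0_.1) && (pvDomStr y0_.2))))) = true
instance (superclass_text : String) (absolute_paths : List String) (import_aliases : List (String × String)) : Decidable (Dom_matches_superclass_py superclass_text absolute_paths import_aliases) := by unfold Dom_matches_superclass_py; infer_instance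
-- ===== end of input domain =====

-- B inverts the iteration: it walks the IMPORTS instead of the candidate paths, matching each
-- alias (or "alias." prefix of the superclass text) and re-joining the dotted path with the
-- remaining attribute, with a single membership test in a set of the paths (objective: alternative).

-- ===== PORT A =====
-- locals of A's loop body: path_parts, short_name, module_path
def mscParts (abs_path : String) : List String := (PySem.Str.split? abs_path ".").getD []
def mscShort (abs_path : String) : String := (PySem.List.pyGet? (mscParts abs_path) (-1)).getD ""
def mscModule (abs_path : String) : String := PySem.Str.join "." (PySem.List.slice (mscParts abs_path) none (some (-1)))

-- A's early-return for loop, as structural recursion over absolute_paths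
def mscGoA (superclass_text : String) (import_aliases : List (String × String)) : List String → Bool
  | [] => false
  | abs_path :: rest =>
    if (match (PySem.Dict.mk import_aliases).get? abs_path with
        | some a => superclass_text == a
        | none => false) then true
    else if mscModule abs_path ≠ "" && (PySem.Dict.mk import_aliases).contains (mscModule abs_path) then
      if superclass_text == ((PySem.Dict.mk import_aliases).get? (mscModule abs_path)).getD "" ++ "." ++ mscShort abs_path then true
      else mscGoA superclass_text import_aliases rest
    else mscGoA superclass_text import_aliases rest

def matches_superclass_py (superclass_text : String) (absolute_paths : List String) (import_aliases : List (String × String)) : Bool :=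
  mscGoA superclass_text import_aliases absolute_paths

-- ===== PORT B =====
-- local of B's loop body: short = superclass_text[len(alias) + 1:]
def mscSuffix (superclass_text aliasName : String) : String :=
  PySem.Str.slice superclass_text (some (PySem.Str.len aliasName + 1)) none

-- B's early-return for loop over the dict items
def mscGoB (superclass_text : String) (pathSet : PySem.Set String) : List (String × String) → Bool
  | [] => false
  | (dotted, aliasName) :: rest =>
    if superclass_text == aliasName && PySem.Set.contains pathSet dotted then true
    else if dotted ≠ "" && PySem.Str.startswith superclass_text (aliasName ++ ".") then
      if !(PySem.Str.isIn "." (mscSuffix superclass_text aliasName)) &&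
         PySem.Set.contains pathSet (dotted ++ "." ++ mscSuffix superclass_text aliasName) then true
      else mscGoB superclass_text pathSet rest
    else mscGoB superclass_text pathSet rest

def matches_superclass_py_alt (superclass_text : String) (absolute_paths : List String) (import_aliases : List (String × String)) : Bool :=
  mscGoB superclass_text (PySem.Set.ofList absolute_paths) import_aliases

-- ===== PRECONDITION & SPEC =====
-- Pre_ only asks the association list to have pairwise-distinct keys: it stands for a Python
-- dict, whose keys are necessarily distinct, so no input that actually reaches the Python
-- function is excluded.
def Pre_matches_superclass_py (superclass_text : String) (absolute_paths : List String) (import_aliases : List (String × String)) : Prop :=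
  (import_aliases.map Prod.fst).Nodup
instance (superclass_text : String) (absolute_paths : List String) (import_aliases : List (String × String)) : Decidable (Pre_matches_superclass_py superclass_text absolute_paths import_aliases) := by unfold Pre_matches_superclass_py; infer_instance

def pvWitness_matches_superclass_py : String × List String × (List (String × String)) :=
  ("models.Model", ["django.db.models.Model"], [("django.db.models", "models")])

def Spec_matches_superclass_py (superclass_text : String) (absolute_paths : List String) (import_aliases : List (String × String)) (out : Bool) : Prop := out = matches_superclass_py_alt superclass_text absolute_paths import_aliases
instance (superclass_text : String) (absolute_paths : List String) (import_aliases : List (String × String)) (out : Bool) : Decidable (Spec_matches_superclass_py superclass_text absolute_paths import_aliases out) := by unfold Spec_matches_superclass_py; infer_instance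

-- ===== CLAIM (what is proved, stated in full; the proofs are below) =====
def Claim_equal_matches_superclass_py : Prop := ∀ (superclass_text : String) (absolute_paths : List String) (import_aliases : List (String × String)), Dom_matches_superclass_py superclass_text absolute_paths import_aliases → Pre_matches_superclass_py superclass_text absolute_paths import_aliases → Spec_matches_superclass_py superclass_text absolute_paths import_aliases (matches_superclass_py superclass_text absolute_paths import_aliases)

-- ===== LEMMAS AND PROOFS =====

theorem strExt {a b : String} (h : a.toList = b.toList) : a = b := String.toList_inj.mp h

-- simple split of a char list at every '.' (what s.split(".") computes)
def dsplit : List Char → List (List Char)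
  | [] => [[]]
  | c :: r => if c = '.' then [] :: dsplit r else (dsplit r).modifyHead (c :: ·)

theorem dsplit_dot (r : List Char) : dsplit ('.' :: r) = [] :: dsplit r := by simp [dsplit]

theorem dsplit_cons (c : Char) (r : List Char) (hc : c ≠ '.') :
    dsplit (c :: r) = (dsplit r).modifyHead (c :: ·) := by simp [dsplit, hc]

theorem dsplit_ne_nil (l : List Char) : dsplit l ≠ [] := by
  induction l with
  | nil => simp [dsplit]
  | cons c r ih =>
    by_cases hc : c = '.'
    · subst hc; simp [dsplit_dot]
    · rw [dsplit_cons c r hc]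
      cases h : dsplit r with
      | nil => exact absurd h ih
      | cons p ps => simp

theorem modifyHead_id_of (xs : List (List Char)) :
    List.modifyHead (fun x => x) xs = xs := by cases xs <;> simp

theorem dsplit_go_eq (fuel : Nat) (l cur : List Char) (acc : List (List Char))
    (h : l.length < fuel) :
    PySem.Chars.splitOn.go ['.'] fuel l cur acc
      = acc.reverse ++ (dsplit l).modifyHead (cur.reverse ++ ·) := by
  induction fuel generalizing l cur acc with
  | zero => omega
  | succ f ih =>
    cases l with
    | nil =>
      rw [PySem.Chars.splitOn.go]
      simp [dsplit]
      all_goals omega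
    | cons c rest =>
      rw [PySem.Chars.splitOn.go]
      by_cases hc : c = '.'
      · subst hc
        have hp : List.isPrefixOf ['.'] ('.' :: rest) = true := by simp [List.isPrefixOf]
        simp only [hp, if_pos]
        have hdrop : List.drop (['.'] : List Char).length ('.' :: rest) = rest := rfl
        rw [hdrop, ih rest [] (cur.reverse :: acc) (by simpa using Nat.lt_of_succ_lt_succ h)]
        rw [dsplit_dot]
        simp [modifyHead_id_of]
      · have hp : List.isPrefixOf ['.'] (c :: rest) = false := by
          simp only [List.isPrefixOf, Bool.and_eq_false_iff]
          left
          simpa [beq_eq_false_iff_ne] using fun hh => hc hh.symm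
        simp only [hp, Bool.false_eq_true, if_false]
        rw [ih rest (c :: cur) acc (by simpa using Nat.lt_of_succ_lt_succ h)]
        rw [dsplit_cons c rest hc]
        cases hd : dsplit rest with
        | nil => exact absurd hd (dsplit_ne_nil rest)
        | cons p ps => simp

theorem splitOn_dot (l : List Char) : PySem.Chars.splitOn l ['.'] = dsplit l := by
  unfold PySem.Chars.splitOn
  rw [dsplit_go_eq (l.length + 1) l [] [] (by omega)]
  cases hd : dsplit l with
  | nil => exact absurd hd (dsplit_ne_nil l)
  | cons p ps => simp

theorem join_cons_head (c : Char) (p : List Char) (ps : List (List Char)) :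
    PySem.Chars.join ['.'] ((c :: p) :: ps) = c :: PySem.Chars.join ['.'] (p :: ps) := by
  cases ps with
  | nil => simp [PySem.Chars.join_singleton]
  | cons q qs => simp [PySem.Chars.join_cons_cons]

theorem dsplit_join (l : List Char) : PySem.Chars.join ['.'] (dsplit l) = l := by
  induction l with
  | nil => simp [dsplit, PySem.Chars.join_singleton]
  | cons c r ih =>
    by_cases hc : c = '.'
    · subst hc
      rw [dsplit_dot]
      cases hd : dsplit r with
      | nil => exact absurd hd (dsplit_ne_nil r)
      | cons q qs =>
        rw [PySem.Chars.join_cons_cons]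
        rw [hd] at ih
        simp [ih]
    · rw [dsplit_cons c r hc]
      cases hd : dsplit r with
      | nil => exact absurd hd (dsplit_ne_nil r)
      | cons q qs =>
        rw [hd] at ih
        simpa [join_cons_head] using congrArg (c :: ·) ih

theorem dsplit_no_dot (l : List Char) : ∀ p, p ∈ dsplit l → '.' ∉ p := by
  induction l with
  | nil =>
    intro p hp
    simp [dsplit] at hp
    simp [hp]
  | cons c r ih =>
    intro p hp
    by_cases hc : c = '.'
    · subst hc
      rw [dsplit_dot] at hp
      rcases List.mem_cons.mp hp with hp | hp
      · simp [hp]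
      · exact ih p hp
    · rw [dsplit_cons c r hc] at hp
      cases hd : dsplit r with
      | nil => exact absurd hd (dsplit_ne_nil r)
      | cons q qs =>
        rw [hd] at hp
        rcases List.mem_cons.mp hp with hp | hp
        · subst hp
          intro hmem
          rcases List.mem_cons.mp hmem with hh | hh
          · exact hc hh.symm
          · exact ih q (by rw [hd]; exact List.mem_cons_self ..) hh
        · exact ih p (by rw [hd]; exact List.mem_cons_of_mem _ hp)

theorem dsplit_single (suf : List Char) (h : '.' ∉ suf) : dsplit suf = [suf] := by
  induction suf with
  | nil => simp [dsplit]
  | cons c r ih =>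
    have hc : c ≠ '.' := fun hh => h (hh ▸ List.mem_cons_self ..)
    have hr : '.' ∉ r := fun hh => h (List.mem_cons_of_mem _ hh)
    rw [dsplit_cons c r hc, ih hr]
    simp

theorem dsplit_append (k suf : List Char) (h : '.' ∉ suf) :
    dsplit (k ++ '.' :: suf) = dsplit k ++ [suf] := by
  induction k with
  | nil => simp [dsplit_dot, dsplit_single suf h, dsplit]
  | cons c k' ih =>
    by_cases hc : c = '.'
    · subst hc
      rw [List.cons_append, dsplit_dot, dsplit_dot, ih]
      simp
    · rw [List.cons_append, dsplit_cons c _ hc, dsplit_cons c k' hc, ih]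
      cases hd : dsplit k' with
      | nil => exact absurd hd (dsplit_ne_nil k')
      | cons p ps => simp

theorem join_append_last (xs : List (List Char)) (y : List Char) (h : xs ≠ []) :
    PySem.Chars.join ['.'] (xs ++ [y]) = PySem.Chars.join ['.'] xs ++ '.' :: y := by
  induction xs with
  | nil => exact absurd rfl h
  | cons p ps ih =>
    cases ps with
    | nil => simp [PySem.Chars.join_cons_cons, PySem.Chars.join_singleton]
    | cons q qs =>
      simp only [List.cons_append]
      rw [PySem.Chars.join_cons_cons]
      rw [show (q :: qs) ++ [y] = q :: (qs ++ [y]) from rfl] at ih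
      rw [ih (by simp), PySem.Chars.join_cons_cons]
      simp

-- char-level short name and module path
def shortC (l : List Char) : List Char := ((dsplit l).getLast?).getD []
def modC (l : List Char) : List Char := PySem.Chars.join ['.'] ((dsplit l).dropLast)

theorem modC_reconstruct (l : List Char) (h : modC l ≠ []) :
    l = modC l ++ '.' :: shortC l := by
  rcases List.eq_nil_or_concat (dsplit l) with hd | ⟨xs, y, hd⟩
  · exact absurd hd (dsplit_ne_nil l)
  · rw [List.concat_eq_append] at hd
    have hxs : xs ≠ [] := by
      intro hx
      apply h
      simp [modC, hd, hx, PySem.Chars.join_nil]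
    have h1 : modC l = PySem.Chars.join ['.'] xs := by simp [modC, hd]
    have h2 : shortC l = y := by simp [shortC, hd]
    have h3 := dsplit_join l
    rw [hd, join_append_last xs y hxs] at h3
    rw [h1, h2]
    exact h3.symm

theorem shortC_no_dot (l : List Char) : '.' ∉ shortC l := by
  rcases List.eq_nil_or_concat (dsplit l) with hd | ⟨xs, y, hd⟩
  · exact absurd hd (dsplit_ne_nil l)
  · rw [List.concat_eq_append] at hd
    have h2 : shortC l = y := by simp [shortC, hd]
    rw [h2]
    exact dsplit_no_dot l y (by rw [hd]; simp)

theorem modC_of_append (k suf : List Char) (h : '.' ∉ suf) :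
    modC (k ++ '.' :: suf) = k ∧ shortC (k ++ '.' :: suf) = suf := by
  constructor
  · simp [modC, dsplit_append k suf h, dsplit_join]
  · simp [shortC, dsplit_append k suf h]

-- bridges between the port's String locals and the char level
theorem mscParts_eq (abs_path : String) :
    mscParts abs_path = (dsplit abs_path.toList).map String.ofList := by
  have hdot : (".":String).toList = ['.'] := rfl
  simp [mscParts, PySem.Str.split?, PySem.Chars.split?, hdot, splitOn_dot]

theorem pyGet?_neg_one {α : Type} (xs : List α) : PySem.List.pyGet? xs (-1) = xs.getLast? := by
  cases xs with
  | nil => rfl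
  | cons x t =>
    simp [PySem.List.pyGet?, PySem.List.pyIdx?]
    rw [List.getLast?_eq_getElem?]
    simp

theorem slice_to_neg_one_list {α : Type} (xs : List α) :
    PySem.List.slice xs none (some (-1)) = xs.dropLast := by
  simp only [PySem.List.slice, PySem.List.clampIdx]
  cases xs with
  | nil => rfl
  | cons x t =>
    have h1 : ¬ ((x :: t).length : Int) + (-1) < 0 := by simp
    simp only [if_neg h1]
    have h2 : ((((x :: t).length) : Int) + -1).toNat = (x :: t).length - 1 := by omega
    rw [h2, List.dropLast_eq_take]
    simp

theorem mscShort_toList (abs_path : String) :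
    (mscShort abs_path).toList = shortC abs_path.toList := by
  rcases List.eq_nil_or_concat (dsplit abs_path.toList) with hd | ⟨xs, y, hd⟩
  · exact absurd hd (dsplit_ne_nil _)
  · rw [List.concat_eq_append] at hd
    rw [mscShort, mscParts_eq, hd]
    simp [pyGet?_neg_one, shortC, hd]

theorem mscModule_toList (abs_path : String) :
    (mscModule abs_path).toList = modC abs_path.toList := by
  rw [mscModule, mscParts_eq, slice_to_neg_one_list, ← List.map_dropLast]
  simp [PySem.Str.join, List.map_map, Function.comp_def, modC,
    show (".":String).toList = ['.'] from rfl]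

theorem mscSuffix_toList (st v : String) (h : (v ++ ".").toList <+: st.toList) :
    st.toList = v.toList ++ '.' :: (mscSuffix st v).toList := by
  obtain ⟨t, ht⟩ := h
  have hvp : (v ++ ".").toList = v.toList ++ ['.'] := by simp
  rw [hvp] at ht
  have hst : st.toList = v.toList ++ '.' :: t := by
    rw [← ht]; simp
  have h0 : (0 : Int) ≤ ((v.toList.length + 1 : Nat) : Int) := by positivity
  have h1 : PySem.Str.len v + 1 = ((v.toList.length + 1 : Nat) : Int) := by
    simp [PySem.Str.len]
  have hbr : (mscSuffix st v).toList
      = PySem.List.slice st.toList (some (PySem.Str.len v + 1)) none := by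
    simp [mscSuffix, PySem.Str.slice]
  have hsuf : (mscSuffix st v).toList = t := by
    rw [hbr, h1, PySem.List.slice_from _ h0, Int.toNat_natCast, hst]
    rw [show v.toList ++ '.' :: t = (v.toList ++ ['.']) ++ t by simp]
    rw [show v.toList.length + 1 = (v.toList ++ ['.']).length by simp]
    exact List.drop_left
  rw [hsuf]
  exact hst

-- the per-item conditions of the two loops
def CondA (st : String) (al : List (String × String)) (p : String) : Prop :=
  (PySem.Dict.mk al).get? p = some st ∨
  (mscModule p ≠ "" ∧ ∃ ma, (PySem.Dict.mk al).get? (mscModule p) = some ma ∧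
    st = ma ++ "." ++ mscShort p)

def CondB (st : String) (pathSet : PySem.Set String) (kv : String × String) : Prop :=
  (st = kv.2 ∧ PySem.Set.contains pathSet kv.1 = true) ∨
  (kv.1 ≠ "" ∧ PySem.Str.startswith st (kv.2 ++ ".") = true ∧
    PySem.Str.isIn "." (mscSuffix st kv.2) = false ∧
    PySem.Set.contains pathSet (kv.1 ++ "." ++ mscSuffix st kv.2) = true)

theorem goA_cons (st : String) (al : List (String × String)) (p : String) (rest : List String) :
    mscGoA st al (p :: rest) = true ↔ CondA st al p ∨ mscGoA st al rest = true := by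
  rw [mscGoA]
  by_cases hdir : (PySem.Dict.mk al).get? p = some st
  · have hb : (match (PySem.Dict.mk al).get? p with
        | some a => st == a
        | none => false) = true := by rw [hdir]; simp
    rw [if_pos hb]
    constructor
    · intro _; exact Or.inl (Or.inl hdir)
    · intro _; rfl
  · have hb : (match (PySem.Dict.mk al).get? p with
        | some a => st == a
        | none => false) = false := by
      cases hgg : (PySem.Dict.mk al).get? p with
      | none => rfl
      | some a =>
        simp only [beq_eq_false_iff_ne]
        exact fun he => hdir (by rw [hgg, he])
    rw [hb]
    simp only [Bool.false_eq_true, if_false]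
    by_cases hm : mscModule p = ""
    · have hc2 : (mscModule p ≠ "" && (PySem.Dict.mk al).contains (mscModule p)) = false := by
        simp [hm]
      rw [hc2]
      simp only [Bool.false_eq_true, if_false]
      constructor
      · exact Or.inr
      · rintro (hc | hr)
        · rcases hc with hdd | ⟨hmm, _⟩
          · exact absurd hdd hdir
          · exact absurd hm hmm
        · exact hr
    · cases hg2 : (PySem.Dict.mk al).get? (mscModule p) with
      | none =>
        have hcont : (PySem.Dict.mk al).contains (mscModule p) = false := by
          rw [PySem.Dict.contains_eq_isSome_get?, hg2]; rfl
        have hc2 : (mscModule p ≠ "" && (PySem.Dict.mk al).contains (mscModule p)) = false := by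
          simp [hcont]
        rw [hc2]
        simp only [Bool.false_eq_true, if_false]
        constructor
        · exact Or.inr
        · rintro (hc | hr)
          · rcases hc with hdd | ⟨_, ma, hma, _⟩
            · exact absurd hdd hdir
            · rw [hg2] at hma; exact absurd hma (by simp)
          · exact hr
      | some ma =>
        have hcont : (PySem.Dict.mk al).contains (mscModule p) = true := by
          rw [PySem.Dict.contains_eq_isSome_get?, hg2]; rfl
        have hc2 : (mscModule p ≠ "" && (PySem.Dict.mk al).contains (mscModule p)) = true := by
          simp [hm, hcont]
        rw [if_pos hc2]
        simp only [Option.getD_some]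
        by_cases h3 : st = ma ++ "." ++ mscShort p
        · have hb3 : (st == ma ++ "." ++ mscShort p) = true := by simp [h3]
          rw [if_pos hb3]
          constructor
          · intro _; exact Or.inl (Or.inr ⟨hm, ma, hg2, h3⟩)
          · intro _; rfl
        · have hb3 : ¬ (st == ma ++ "." ++ mscShort p) = true := by
            simp only [beq_iff_eq]
            exact h3
          rw [if_neg hb3]
          constructor
          · exact Or.inr
          · rintro (hc | hr)
            · rcases hc with hdd | ⟨_, ma', hma', hst'⟩
              · exact absurd hdd hdir
              · rw [hg2] at hma'
                have : ma = ma' := by injection hma'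
                exact absurd (this ▸ hst') h3
            · exact hr

theorem goA_iff (st : String) (al : List (String × String)) (paths : List String) :
    mscGoA st al paths = true ↔ ∃ p ∈ paths, CondA st al p := by
  induction paths with
  | nil => simp [mscGoA]
  | cons p rest ih => rw [goA_cons, ih]; simp

theorem goB_cons (st : String) (pathSet : PySem.Set String) (kv : String × String)
    (rest : List (String × String)) :
    mscGoB st pathSet (kv :: rest) = true ↔ CondB st pathSet kv ∨ mscGoB st pathSet rest = true := by
  obtain ⟨k, v⟩ := kv
  rw [mscGoB]
  by_cases hb1 : (st == v && PySem.Set.contains pathSet k) = true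
  · rw [if_pos hb1]
    rw [Bool.and_eq_true] at hb1
    constructor
    · intro _
      exact Or.inl (Or.inl ⟨by simpa using hb1.1, hb1.2⟩)
    · intro _; rfl
  · rw [if_neg hb1]
    by_cases hb2 : (k ≠ "" && PySem.Str.startswith st (v ++ ".")) = true
    · rw [if_pos hb2]
      have hb2' : k ≠ "" ∧ PySem.Str.startswith st (v ++ ".") = true := by
        rw [Bool.and_eq_true] at hb2
        exact ⟨by simpa using hb2.1, hb2.2⟩
      by_cases hb3 : (!(PySem.Str.isIn "." (mscSuffix st v)) &&
          PySem.Set.contains pathSet (k ++ "." ++ mscSuffix st v)) = true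
      · rw [if_pos hb3]
        rw [Bool.and_eq_true, Bool.not_eq_eq_eq_not] at hb3
        constructor
        · intro _
          exact Or.inl (Or.inr ⟨hb2'.1, hb2'.2, by simpa using hb3.1, hb3.2⟩)
        · intro _; rfl
      · rw [if_neg hb3]
        constructor
        · exact Or.inr
        · rintro (hc | hr)
          · rcases hc with ⟨he, hcont⟩ | ⟨_, _, hisin, hcont⟩
            · have he' : st = v := he
              have hcont' : PySem.Set.contains pathSet k = true := hcont
              exact absurd (by rw [Bool.and_eq_true]; exact ⟨beq_iff_eq.mpr he', hcont'⟩ :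
                (st == v && PySem.Set.contains pathSet k) = true) hb1
            · have hisin' : PySem.Str.isIn "." (mscSuffix st v) = false := hisin
              have hcont' : PySem.Set.contains pathSet (k ++ "." ++ mscSuffix st v) = true := hcont
              exact absurd (by rw [Bool.and_eq_true]; exact ⟨by rw [hisin']; rfl, hcont'⟩ :
                (!(PySem.Str.isIn "." (mscSuffix st v)) &&
                  PySem.Set.contains pathSet (k ++ "." ++ mscSuffix st v)) = true) hb3
          · exact hr
    · rw [if_neg hb2]
      constructor
      · exact Or.inr
      · rintro (hc | hr)
        · rcases hc with ⟨he, hcont⟩ | ⟨hk, hsw, _, _⟩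
          · have he' : st = v := he
            have hcont' : PySem.Set.contains pathSet k = true := hcont
            exact absurd (by rw [Bool.and_eq_true]; exact ⟨beq_iff_eq.mpr he', hcont'⟩ :
              (st == v && PySem.Set.contains pathSet k) = true) hb1
          · have hk' : k ≠ "" := hk
            have hsw' : PySem.Str.startswith st (v ++ ".") = true := hsw
            exact absurd (by rw [Bool.and_eq_true]; exact ⟨decide_eq_true hk', hsw'⟩ :
              (k ≠ "" && PySem.Str.startswith st (v ++ ".")) = true) hb2
        · exact hr

theorem goB_iff (st : String) (pathSet : PySem.Set String) (al : List (String × String)) :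
    mscGoB st pathSet al = true ↔ ∃ kv ∈ al, CondB st pathSet kv := by
  induction al with
  | nil => simp [mscGoB]
  | cons kv rest ih => rw [goB_cons, ih]; simp

-- membership in the set B builds over absolute_paths
theorem setContains_iff (paths : List String) (x : String) :
    PySem.Set.contains (PySem.Set.ofList paths) x = true ↔ x ∈ paths := by
  rw [PySem.Set.contains, List.contains_iff_mem, PySem.Set.mem_ofList]

theorem isIn_dot_false_iff (w : String) :
    PySem.Str.isIn "." w = false ↔ '.' ∉ w.toList := by
  rw [PySem.Str.isIn_eq]
  rw [show (".":String).toList = ['.'] from rfl]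
  rw [PySem.Chars.isIn_eq_false_iff]
  simp [List.singleton_infix_iff]

theorem toList_ne_nil (s : String) (h : s ≠ "") : s.toList ≠ [] := by
  intro hh
  exact h (strExt (by simp [hh]))

theorem main_iff (st : String) (paths : List String) (al : List (String × String))
    (hnd : (al.map Prod.fst).Nodup) :
    (∃ p ∈ paths, CondA st al p) ↔ (∃ kv ∈ al, CondB st (PySem.Set.ofList paths) kv) := by
  have hknd : (PySem.Dict.mk al).keys.Nodup := by
    simpa [PySem.Dict.keys, PySem.Dict.items] using hnd
  constructor
  · rintro ⟨p, hp, hc⟩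
    rcases hc with hdir | ⟨hm, ma, hget, hst⟩
    · refine ⟨(p, st), PySem.Dict.mem_items_of_get?_eq_some _ hdir, Or.inl ⟨rfl, ?_⟩⟩
      exact (setContains_iff paths p).mpr hp
    · refine ⟨(mscModule p, ma), PySem.Dict.mem_items_of_get?_eq_some _ hget, Or.inr ?_⟩
      have hstL : st.toList = ma.toList ++ '.' :: (mscShort p).toList := by
        rw [hst]; simp
      have hpre : (ma ++ ".").toList <+: st.toList := by
        rw [hstL]
        exact ⟨(mscShort p).toList, by simp⟩
      have hsufL := mscSuffix_toList st ma hpre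
      have hsufEq : (mscSuffix st ma).toList = (mscShort p).toList := by
        have h' := List.append_cancel_left (hstL.symm.trans hsufL)
        have h'' : (mscShort p).toList = (mscSuffix st ma).toList := by
          simpa using h'
        exact h''.symm
      refine ⟨hm, ?_, ?_, ?_⟩
      · rw [PySem.Str.startswith_eq]
        exact (PySem.Chars.startswith_iff _ _).mpr hpre
      · rw [isIn_dot_false_iff, hsufEq, mscShort_toList]
        exact shortC_no_dot _
      · have hmodL := mscModule_toList p
        have hmodne : modC p.toList ≠ [] := by
          rw [← hmodL]
          exact toList_ne_nil _ hm
        have hrec := modC_reconstruct p.toList hmodne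
        have hq : (mscModule p ++ "." ++ mscSuffix st ma).toList = p.toList := by
          conv_rhs => rw [hrec]
          simp [hmodL, hsufEq, mscShort_toList]
        have hq' : mscModule p ++ "." ++ mscSuffix st ma = p := strExt hq
        rw [setContains_iff, hq']
        exact hp
  · rintro ⟨⟨k, v⟩, hmem, hc⟩
    have hget : (PySem.Dict.mk al).get? k = some v :=
      PySem.Dict.get?_of_mem_items _ hmem hknd
    rcases hc with ⟨hst, hcont⟩ | ⟨hk, hsw, hdot, hcont⟩
    · exact ⟨k, (setContains_iff paths k).mp hcont, Or.inl (by rw [hget, hst])⟩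
    · have hpre : (v ++ ".").toList <+: st.toList := by
        rw [PySem.Str.startswith_eq] at hsw
        exact (PySem.Chars.startswith_iff _ _).mp hsw
      have hstL := mscSuffix_toList st v hpre
      have hnodot : '.' ∉ (mscSuffix st v).toList := (isIn_dot_false_iff _).mp hdot
      have hqL : (k ++ "." ++ mscSuffix st v).toList
          = k.toList ++ '.' :: (mscSuffix st v).toList := by simp
      obtain ⟨hmod, hshort⟩ := modC_of_append k.toList (mscSuffix st v).toList hnodot
      have hmodq : mscModule (k ++ "." ++ mscSuffix st v) = k := by
        apply strExt
        rw [mscModule_toList, hqL, hmod]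
      have hshortq : (mscShort (k ++ "." ++ mscSuffix st v)).toList = (mscSuffix st v).toList := by
        rw [mscShort_toList, hqL, hshort]
      refine ⟨k ++ "." ++ mscSuffix st v, (setContains_iff paths _).mp hcont,
        Or.inr ⟨?_, v, ?_, ?_⟩⟩
      · rw [hmodq]; exact hk
      · rw [hmodq]; exact hget
      · apply strExt
        rw [hstL]
        simp [hshortq]

-- ===== VERDICT (by name: the statement is the Claim_ definition above) =====
theorem matches_superclass_py_spec : Claim_equal_matches_superclass_py := by
  intro st paths al _ hpre
  unfold Spec_matches_superclass_py matches_superclass_py matches_superclass_py_alt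
  rw [Bool.eq_iff_iff, goA_iff, goB_iff]
  exact main_iff st paths al hpre
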